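-- pv_equiv track=rewrite | github.com/gianverdum/fde-technical-screen | src/fde/utils.py | format_classification_summary
-- ===== SOURCE A (Python) =====
-- from typing import List, Dict, Any
--
-- def format_classification_summary(results: List[str]) -> Dict[str, int]:
--     """Generate a summary of classification results.
--
--     Args:
--         results: List of classification results (STANDARD, SPECIAL, REJECTED).
--
--     Returns:
--         Dictionary with counts for each classification category.
--     """
--     summary = {
--         'STANDARD': 0,
--         'SPECIAL': 0,
--         'REJECTED': 0
--     }
--
--     for result in results:
--         if result in summary:
--             summary[result] += 1
--
--     return summary
-- ===== SOURCE B (Python) =====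
-- def format_classification_summary(results):
--     """Generate a summary of classification results.
--
--     One full scan of results per category instead of a single
--     membership-guarded accumulation pass.
--     """
--     return {cat: results.count(cat) for cat in ('STANDARD', 'SPECIAL', 'REJECTED')}
-- ===== Notes on version B (the rewrite author's own statement) =====
-- stated objective: simpler
-- what changed: Replaced the single filtered pass over results that increments a preseeded dict with a dict comprehension over the three fixed category names, each counted by its own full scan via results.count.
import Mathlib
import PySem

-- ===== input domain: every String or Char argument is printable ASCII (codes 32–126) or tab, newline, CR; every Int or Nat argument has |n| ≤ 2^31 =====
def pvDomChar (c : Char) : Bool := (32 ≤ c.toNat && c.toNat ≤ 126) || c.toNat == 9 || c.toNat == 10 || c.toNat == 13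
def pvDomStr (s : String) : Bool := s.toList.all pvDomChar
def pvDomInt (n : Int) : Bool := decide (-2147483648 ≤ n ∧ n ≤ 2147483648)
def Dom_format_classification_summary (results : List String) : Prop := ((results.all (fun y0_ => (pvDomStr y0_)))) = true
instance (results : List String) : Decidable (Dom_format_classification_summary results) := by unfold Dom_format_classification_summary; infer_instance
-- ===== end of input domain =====

-- B is a dict comprehension counting each of the three fixed categories by its own
-- full scan (results.count), instead of A's single membership-guarded accumulation pass.

-- ===== PORT A =====
-- summary = {'STANDARD': 0, 'SPECIAL': 0, 'REJECTED': 0}; for result in results: if result in summary: summary[result] += 1; return summary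
def format_classification_summary (results : List String) : List (String × Int) :=
  (results.foldl
    (fun summary result =>
      if summary.contains result then summary.modify result 0 (· + 1) else summary)
    (PySem.Dict.ofList [("STANDARD", 0), ("SPECIAL", 0), ("REJECTED", 0)])).items

-- ===== PORT B =====
-- {cat: results.count(cat) for cat in ('STANDARD', 'SPECIAL', 'REJECTED')}
def format_classification_summary_alt (results : List String) : List (String × Int) :=
  ["STANDARD", "SPECIAL", "REJECTED"].map (fun cat => (cat, (results.count cat : Int)))

-- ===== PRECONDITION & SPEC =====
def Spec_format_classification_summary (results : List String) (out : List (String × Int)) : Prop := out = format_classification_summary_alt results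
instance (results : List String) (out : List (String × Int)) : Decidable (Spec_format_classification_summary results out) := by unfold Spec_format_classification_summary; infer_instance

-- ===== CLAIM (what is proved, stated in full; the proofs are below) =====
def Claim_equal_format_classification_summary : Prop := ∀ (results : List String), Dom_format_classification_summary results → Spec_format_classification_summary results (format_classification_summary results)

-- ===== LEMMAS AND PROOFS =====

-- ===== VERDICT (by name: the statement is the Claim_ definition above) =====
-- Loop invariant: folding A's step over l on the preseeded three-key dict adds each
-- key's count in l to its stored value, leaving keys and order unchanged.
theorem fcs_invariant (l : List String) (a b c : Int) :
    (l.foldl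
      (fun summary result =>
        if summary.contains result then summary.modify result 0 (· + 1) else summary)
      (PySem.Dict.mk [("STANDARD", a), ("SPECIAL", b), ("REJECTED", c)])).items
    = [("STANDARD", a + l.count "STANDARD"), ("SPECIAL", b + l.count "SPECIAL"),
       ("REJECTED", c + l.count "REJECTED")] := by
  induction l generalizing a b c with
  | nil => simp
  | cons x xs ih =>
    rw [List.foldl_cons]
    by_cases h1 : x = "STANDARD"
    · subst h1
      rw [show (if (PySem.Dict.mk [("STANDARD", a), ("SPECIAL", b), ("REJECTED", c)]).contains
            "STANDARD" then
            (PySem.Dict.mk [("STANDARD", a), ("SPECIAL", b),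
              ("REJECTED", c)]).modify "STANDARD" 0 (· + 1)
          else PySem.Dict.mk [("STANDARD", a), ("SPECIAL", b), ("REJECTED", c)])
          = PySem.Dict.mk [("STANDARD", a + 1), ("SPECIAL", b), ("REJECTED", c)] from by
            simp [PySem.Dict.modify, PySem.Dict.insert, PySem.Dict.getD, PySem.Dict.get?], ih]
      simp
      ring
    · by_cases h2 : x = "SPECIAL"
      · subst h2
        rw [show (if (PySem.Dict.mk [("STANDARD", a), ("SPECIAL", b), ("REJECTED", c)]).contains
              "SPECIAL" then
              (PySem.Dict.mk [("STANDARD", a), ("SPECIAL", b),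
                ("REJECTED", c)]).modify "SPECIAL" 0 (· + 1)
            else PySem.Dict.mk [("STANDARD", a), ("SPECIAL", b), ("REJECTED", c)])
            = PySem.Dict.mk [("STANDARD", a), ("SPECIAL", b + 1), ("REJECTED", c)] from by
              simp [PySem.Dict.modify, PySem.Dict.insert, PySem.Dict.getD, PySem.Dict.get?], ih]
        simp
        ring
      · by_cases h3 : x = "REJECTED"
        · subst h3
          rw [show (if (PySem.Dict.mk [("STANDARD", a), ("SPECIAL", b),
                ("REJECTED", c)]).contains "REJECTED" then
                (PySem.Dict.mk [("STANDARD", a), ("SPECIAL", b),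
                  ("REJECTED", c)]).modify "REJECTED" 0 (· + 1)
              else PySem.Dict.mk [("STANDARD", a), ("SPECIAL", b), ("REJECTED", c)])
              = PySem.Dict.mk [("STANDARD", a), ("SPECIAL", b), ("REJECTED", c + 1)] from by
                simp [PySem.Dict.modify, PySem.Dict.insert, PySem.Dict.getD, PySem.Dict.get?], ih]
          simp
          ring
        · rw [show (if (PySem.Dict.mk [("STANDARD", a), ("SPECIAL", b),
                ("REJECTED", c)]).contains x then
                (PySem.Dict.mk [("STANDARD", a), ("SPECIAL", b),
                  ("REJECTED", c)]).modify x 0 (· + 1)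
              else PySem.Dict.mk [("STANDARD", a), ("SPECIAL", b), ("REJECTED", c)])
              = PySem.Dict.mk [("STANDARD", a), ("SPECIAL", b), ("REJECTED", c)] from by
                simp [Ne.symm h1, Ne.symm h2, Ne.symm h3], ih]
          simp [h1, h2, h3]

theorem format_classification_summary_spec : Claim_equal_format_classification_summary := by
  intro results _
  unfold Spec_format_classification_summary format_classification_summary
    format_classification_summary_alt
  rw [show PySem.Dict.ofList [(("STANDARD" : String), (0 : Int)), ("SPECIAL", 0), ("REJECTED", 0)]
      = PySem.Dict.mk [("STANDARD", 0), ("SPECIAL", 0), ("REJECTED", 0)] from rfl]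
  simpa using fcs_invariant results 0 0 0
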